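-- pv_equiv track=rewrite | github.com/adilamanmohammed/FLT_Assignment5 | prog5.py | generateAllSymbolCombinations
-- ===== SOURCE A (Python) =====
-- def generateAllSymbolCombinations(symbol_sequence, nullable_symbols):
--     #base case: if there's no symbols, just return a list with an empty list
--     if not symbol_sequence:
--         return [[]]
--
--     #grab the first symbol from the sequence
--     current_symbol = symbol_sequence[0]
--
--     #recursively find all combinations for the rest of the sequence
--     combinations_for_rest = generateAllSymbolCombinations(symbol_sequence[1:], nullable_symbols)
--
--     #initialize a list to store all possible combinations
--     all_combinations = []
--
--     #if the current symbol can be nullable, add combinations with and without it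
--     if current_symbol in nullable_symbols:
--         #with current symbol
--         with_current = [[current_symbol] + combo for combo in combinations_for_rest]
--         #without current symbol
--         without_current = [combo for combo in combinations_for_rest]
--         #add both to all combinations
--         all_combinations = with_current + without_current
--     else:
--         #if it's not nullable, just add combinations with the current symbol
--         all_combinations = [[current_symbol] + combo for combo in combinations_for_rest]
--
--     #returning all the combinations
--     return all_combinations
-- ===== SOURCE B (Python) =====
-- def generateAllSymbolCombinations(symbol_sequence, nullable_symbols):
--     result = [[]]
--     for sym in reversed(symbol_sequence):
--         if sym in nullable_symbols:
--             result = [[sym] + combo for combo in result] + result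
--         else:
--             result = [[sym] + combo for combo in result]
--     return result
-- ===== Notes on version B (the rewrite author's own statement) =====
-- stated objective: alternative
-- what changed: Replaces the recursion over the sequence with an explicit bottom-up loop over the reversed sequence maintaining the combination list iteratively, avoiding the call stack and the intermediate with/without list copies.
import Mathlib
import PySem

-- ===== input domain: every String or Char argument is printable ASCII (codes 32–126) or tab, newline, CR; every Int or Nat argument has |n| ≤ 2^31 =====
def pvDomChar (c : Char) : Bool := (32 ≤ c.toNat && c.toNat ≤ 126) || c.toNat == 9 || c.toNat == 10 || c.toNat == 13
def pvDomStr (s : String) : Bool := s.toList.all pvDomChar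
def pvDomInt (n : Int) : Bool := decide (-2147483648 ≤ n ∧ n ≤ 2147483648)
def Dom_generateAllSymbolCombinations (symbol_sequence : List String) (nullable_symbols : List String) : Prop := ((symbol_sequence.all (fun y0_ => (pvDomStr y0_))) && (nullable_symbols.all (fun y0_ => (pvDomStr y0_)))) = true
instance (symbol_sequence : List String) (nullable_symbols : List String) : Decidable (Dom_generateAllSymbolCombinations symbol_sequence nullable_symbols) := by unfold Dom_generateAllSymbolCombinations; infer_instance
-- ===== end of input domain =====

-- ===== PORT A =====
-- Literal port of A: recursion on the sequence; "without_current" is the list copy [combo for combo in rest].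
def generateAllSymbolCombinations (symbol_sequence : List String) (nullable_symbols : List String) : List (List String) :=
  match symbol_sequence with
  | [] => [[]]
  | current_symbol :: rest =>
    let combinations_for_rest := generateAllSymbolCombinations rest nullable_symbols
    if current_symbol ∈ nullable_symbols then
      let with_current := combinations_for_rest.map (fun combo => current_symbol :: combo)
      let without_current := combinations_for_rest.map (fun combo => combo)
      with_current ++ without_current
    else
      combinations_for_rest.map (fun combo => current_symbol :: combo)

-- ===== PORT B =====
-- Port of B: iterative fold over the reversed sequence, result list as accumulator.
def generateAllSymbolCombinations_alt (symbol_sequence : List String) (nullable_symbols : List String) : List (List String) :=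
  symbol_sequence.reverse.foldl
    (fun result sym =>
      if sym ∈ nullable_symbols then
        result.map (fun combo => sym :: combo) ++ result
      else
        result.map (fun combo => sym :: combo))
    [[]]

-- ===== PRECONDITION & SPEC =====
def Spec_generateAllSymbolCombinations (symbol_sequence : List String) (nullable_symbols : List String) (out : List (List String)) : Prop := out = generateAllSymbolCombinations_alt symbol_sequence nullable_symbols
instance (symbol_sequence : List String) (nullable_symbols : List String) (out : List (List String)) : Decidable (Spec_generateAllSymbolCombinations symbol_sequence nullable_symbols out) := by unfold Spec_generateAllSymbolCombinations; infer_instance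

-- ===== CLAIM (what is proved, stated in full; the proofs are below) =====
def Claim_equal_generateAllSymbolCombinations : Prop := ∀ (symbol_sequence : List String) (nullable_symbols : List String), Dom_generateAllSymbolCombinations symbol_sequence nullable_symbols → Spec_generateAllSymbolCombinations symbol_sequence nullable_symbols (generateAllSymbolCombinations symbol_sequence nullable_symbols)

-- ===== LEMMAS AND PROOFS =====

-- ===== VERDICT (by name: the statement is the Claim_ definition above) =====
theorem alt_eq (symbol_sequence nullable_symbols : List String) :
    generateAllSymbolCombinations_alt symbol_sequence nullable_symbols =
    generateAllSymbolCombinations symbol_sequence nullable_symbols := by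
  induction symbol_sequence with
  | nil => rfl
  | cons s rest ih =>
    simp only [generateAllSymbolCombinations_alt, List.reverse_cons, List.foldl_append,
      List.foldl_cons, List.foldl_nil] at *
    rw [ih]
    simp [generateAllSymbolCombinations]

theorem generateAllSymbolCombinations_spec : Claim_equal_generateAllSymbolCombinations := by
  intro seq ns _
  unfold Spec_generateAllSymbolCombinations
  exact (alt_eq seq ns).symm
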